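-- pv_equiv track=rewrite | github.com/diego-escobedo/6.006 | PS0/ps0-template/ps0-template/min_mod_tuple.py | min_mod_tuple
-- ===== SOURCE A (Python) =====
-- def min_mod_tuple(A, k):
--     pools = [[x for x in range(len(A))], [x for x in range(len(A))]]
--     result = [[]]
--     for pool in pools:
--         result = [x+[y] for x in result for y in pool if y not in x]
--     minim = 9999999999999999999
--     ret = None
--     for test in result:
--         i,j = test
--         if (A[i]*A[j])%k < minim:
--             minim = (A[i]*A[j])%k
--             ret = [i,j]
--     return tuple(sorted(ret))
-- ===== SOURCE B (Python) =====
-- def min_mod_tuple(A, k):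
--     best = None
--     for i in range(len(A)):
--         for j in range(i + 1, len(A)):
--             v = (A[i] * A[j]) % k
--             if best is None or v < best[0]:
--                 best = (v, i, j)
--     return (best[1], best[2])
-- ===== Notes on version B (the rewrite author's own statement) =====
-- stated objective: faster
-- what changed: B replaces A's two-stage materialization of all n*(n-1) ordered index pairs (built by repeated list comprehensions) plus a separate scan by one fused pair of nested loops over only the n*(n-1)/2 pairs with i<j, tracking the running minimum and its indices directly, with no pair list, no sentinel and no final sort.
import Mathlib
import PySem

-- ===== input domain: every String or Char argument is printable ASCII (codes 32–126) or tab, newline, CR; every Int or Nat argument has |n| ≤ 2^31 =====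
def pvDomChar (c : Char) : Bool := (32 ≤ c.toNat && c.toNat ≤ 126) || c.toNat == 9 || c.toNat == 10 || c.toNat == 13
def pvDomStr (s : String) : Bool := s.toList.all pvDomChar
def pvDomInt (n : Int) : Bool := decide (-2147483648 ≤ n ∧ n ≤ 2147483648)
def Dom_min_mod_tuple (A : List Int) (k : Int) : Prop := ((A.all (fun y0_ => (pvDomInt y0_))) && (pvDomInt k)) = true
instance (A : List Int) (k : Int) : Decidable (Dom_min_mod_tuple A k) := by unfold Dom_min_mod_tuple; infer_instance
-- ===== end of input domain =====

-- B fuses A's build-all-ordered-pairs-then-scan into one pass over only the i<j pairs (faster by a constant factor, no pair list materialized).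

-- ===== PORT A =====
-- loop body of A's 'for test in result' scan, as a named helper
def pvStepA (A : List Int) (k : Int) (st : Int × Option (List Int)) (test : List Int) : Int × Option (List Int) :=
  let i := test.getD 0 0
  let j := test.getD 1 0
  if PySem.Int.mod (PySem.List.pyGetD A i 0 * PySem.List.pyGetD A j 0) k < st.1 then
    (PySem.Int.mod (PySem.List.pyGetD A i 0 * PySem.List.pyGetD A j 0) k, some [i, j])
  else st

def min_mod_tuple (A : List Int) (k : Int) : Int × Int :=
  let pools : List (List Int) :=
    [PySem.List.pyRange 0 (PySem.List.len A) 1, PySem.List.pyRange 0 (PySem.List.len A) 1]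
  let result : List (List Int) :=
    pools.foldl (fun result pool =>
      result.flatMap (fun x => (pool.filter (fun y => !(decide (y ∈ x)))).map (fun y => x ++ [y])))
      [[]]
  let st := result.foldl (pvStepA A k) (9999999999999999999, none)
  match st.2 with
  | some ret =>
      let s := PySem.List.sorted ret (fun x => x) false
      (s.getD 0 0, s.getD 1 0)
  | none => (0, 0)  -- Python raises TypeError here (sorted(None), only when len(A) < 2); excluded by Pre_

-- ===== PORT B =====
-- inner-loop body of B, as a named helper
def pvStepB (A : List Int) (k : Int) (best : Option (Int × Int × Int)) (i j : Int) : Option (Int × Int × Int) :=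
  let v := PySem.Int.mod (PySem.List.pyGetD A i 0 * PySem.List.pyGetD A j 0) k
  match best with
  | none => some (v, i, j)
  | some (m, p, q) => if v < m then some (v, i, j) else some (m, p, q)

def min_mod_tuple_alt (A : List Int) (k : Int) : Int × Int :=
  let n := PySem.List.len A
  let best : Option (Int × Int × Int) :=
    (PySem.List.pyRange 0 n 1).foldl (fun best i =>
      (PySem.List.pyRange (i + 1) n 1).foldl (fun best j => pvStepB A k best i j) best) none
  match best with
  | some (_, i, j) => (i, j)
  | none => (0, 0)  -- Python raises TypeError here (best is None, only when len(A) < 2); excluded by Pre_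

-- ===== PRECONDITION & SPEC =====
-- A raises TypeError when len(A) < 2 (ret stays None) and ZeroDivisionError when k = 0; exactly those inputs are excluded.
def Pre_min_mod_tuple (A : List Int) (k : Int) : Prop := 2 ≤ A.length ∧ k ≠ 0
instance (A : List Int) (k : Int) : Decidable (Pre_min_mod_tuple A k) := by unfold Pre_min_mod_tuple; infer_instance
def pvWitness_min_mod_tuple : List Int × Int := ([2, 3, 5], 7)

def Spec_min_mod_tuple (A : List Int) (k : Int) (out : Int × Int) : Prop := out = min_mod_tuple_alt A k
instance (A : List Int) (k : Int) (out : Int × Int) : Decidable (Spec_min_mod_tuple A k out) := by unfold Spec_min_mod_tuple; infer_instance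

-- ===== CLAIM (what is proved, stated in full; the proofs are below) =====
def Claim_equal_min_mod_tuple : Prop := ∀ (A : List Int) (k : Int), Dom_min_mod_tuple A k → Pre_min_mod_tuple A k → Spec_min_mod_tuple A k (min_mod_tuple A k)

-- ===== LEMMAS AND PROOFS =====

-- f on an index pair
def pvF (A : List Int) (k : Int) (p : Int × Int) : Int :=
  PySem.Int.mod (PySem.List.pyGetD A p.1 0 * PySem.List.pyGetD A p.2 0) k

-- lexicographic order on index pairs
def pvLt (p q : Int × Int) : Prop := p.1 < q.1 ∨ (p.1 = q.1 ∧ p.2 < q.2)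

-- running minimum of f over a pair list, seeded with c
def pvMin (f : Int × Int → Int) (c : Int) (L : List (Int × Int)) : Int :=
  L.foldl (fun m p => min m (f p)) c

-- A's scan abstracted over pairs
def pvFold (f : Int × Int → Int) (L : List (Int × Int)) (st : Int × Option (Int × Int)) :
    Int × Option (Int × Int) :=
  L.foldl (fun st p => if f p < st.1 then (f p, some p) else st) st

-- B's scan abstracted over pairs
def pvFoldB (f : Int × Int → Int) (L : List (Int × Int)) (st : Option (Int × (Int × Int))) :
    Option (Int × (Int × Int)) :=
  L.foldl (fun st p =>
    match st with
    | none => some (f p, p)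
    | some (m, q) => if f p < m then some (f p, p) else some (m, q)) st

-- the two pair lists
def pvAll (n : Int) : List (Int × Int) :=
  (PySem.List.pyRange 0 n 1).flatMap
    (fun i => ((PySem.List.pyRange 0 n 1).filter (fun j => !(decide (j = i)))).map (fun j => (i, j)))
def pvUp (n : Int) : List (Int × Int) :=
  (PySem.List.pyRange 0 n 1).flatMap (fun i => (PySem.List.pyRange (i + 1) n 1).map (fun j => (i, j)))

theorem pvMin_cons (f : Int × Int → Int) (c : Int) (a : Int × Int) (T : List (Int × Int)) :
    pvMin f c (a :: T) = pvMin f (min c (f a)) T := rfl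

theorem pvMin_le_c (f : Int × Int → Int) (L : List (Int × Int)) : ∀ c, pvMin f c L ≤ c := by
  induction L with
  | nil => intro c; simp [pvMin]
  | cons a T ih =>
    intro c
    calc pvMin f c (a :: T) = pvMin f (min c (f a)) T := rfl
    _ ≤ min c (f a) := ih _
    _ ≤ c := min_le_left _ _

theorem pvMin_le_mem (f : Int × Int → Int) (L : List (Int × Int)) :
    ∀ c, ∀ p ∈ L, pvMin f c L ≤ f p := by
  induction L with
  | nil => intro c p hp; simp at hp
  | cons a T ih =>
    intro c p hp
    rcases List.mem_cons.1 hp with h | h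
    · subst h
      calc pvMin f c (p :: T) = pvMin f (min c (f p)) T := rfl
      _ ≤ min c (f p) := pvMin_le_c _ _ _
      _ ≤ f p := min_le_right _ _
    · exact ih _ p h

theorem pvMin_attained (f : Int × Int → Int) (L : List (Int × Int)) :
    ∀ c, pvMin f c L = c ∨ ∃ p ∈ L, f p = pvMin f c L := by
  induction L with
  | nil => intro c; left; rfl
  | cons a T ih =>
    intro c
    rcases ih (min c (f a)) with h | ⟨p, hp, hf⟩
    · rw [pvMin_cons, h]
      by_cases hle : c ≤ f a
      · left; omega
      · right; exact ⟨a, List.mem_cons_self, by omega⟩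
    · right; exact ⟨p, List.mem_cons_of_mem _ hp, by rw [pvMin_cons]; exact hf⟩

theorem pvFold_char (f : Int × Int → Int) (L : List (Int × Int)) :
    ∀ (c : Int) (r : Option (Int × Int)),
      pvFold f L (c, r) =
        (pvMin f c L,
          if pvMin f c L < c then L.find? (fun p => f p == pvMin f c L) else r) := by
  induction L with
  | nil => intro c r; simp [pvFold, pvMin]
  | cons a T ih =>
    intro c r
    by_cases h : f a < c
    · have hstep : pvFold f (a :: T) (c, r) = pvFold f T (f a, some a) := by
        simp [pvFold, h]
      rw [hstep, ih]
      have hmin : min c (f a) = f a := by omega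
      have hM : pvMin f c (a :: T) = pvMin f (f a) T := by rw [pvMin_cons, hmin]
      have hMle : pvMin f (f a) T ≤ f a := pvMin_le_c _ _ _
      by_cases heq : f a = pvMin f (f a) T
      · have hnot : ¬ pvMin f (f a) T < f a := by omega
        rw [hM]
        simp [heq.symm]
        omega
      · have hlt2 : pvMin f (f a) T < f a := by omega
        rw [hM]
        have hne : (f a == pvMin f (f a) T) = false := by simp [heq]
        simp [hlt2, hne]
        omega
    · have hstep : pvFold f (a :: T) (c, r) = pvFold f T (c, r) := by
        simp [pvFold, h]
      rw [hstep, ih]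
      have hmin : min c (f a) = c := by omega
      have hM : pvMin f c (a :: T) = pvMin f c T := by rw [pvMin_cons, hmin]
      rw [hM]
      by_cases hlt2 : pvMin f c T < c
      · have hne : (f a == pvMin f c T) = false := by
          simp; omega
        simp [hlt2, hne]
      · simp [hlt2]

theorem pvFoldB_some (f : Int × Int → Int) (L : List (Int × Int)) :
    ∀ (c : Int) (q : Int × Int),
      pvFoldB f L (some (c, q)) =
        some (pvMin f c L,
          if pvMin f c L < c then (L.find? (fun p => f p == pvMin f c L)).getD q else q) := by
  induction L with
  | nil => intro c q; simp [pvFoldB, pvMin]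
  | cons a T ih =>
    intro c q
    by_cases h : f a < c
    · have hstep : pvFoldB f (a :: T) (some (c, q)) = pvFoldB f T (some (f a, a)) := by
        simp [pvFoldB, h]
      rw [hstep, ih]
      have hmin : min c (f a) = f a := by omega
      have hM : pvMin f c (a :: T) = pvMin f (f a) T := by rw [pvMin_cons, hmin]
      have hMle : pvMin f (f a) T ≤ f a := pvMin_le_c _ _ _
      rw [hM]
      by_cases heq : f a = pvMin f (f a) T
      · have hnot : ¬ pvMin f (f a) T < f a := by omega
        have hblt : pvMin f (f a) T < c := by omega
        simp [hnot, hblt, ← heq]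
        intro hc
        exact absurd hc (by omega)
      · have hlt2 : pvMin f (f a) T < f a := by omega
        have hblt : pvMin f (f a) T < c := by omega
        have hne : (f a == pvMin f (f a) T) = false := by simp [heq]
        rcases pvMin_attained f T (f a) with hc | ⟨p, hp, hf⟩
        · omega
        · have hfind : ∃ y, T.find? (fun p => f p == pvMin f (f a) T) = some y := by
            rcases hy : T.find? (fun p => f p == pvMin f (f a) T) with _ | y
            · rw [List.find?_eq_none] at hy
              exact absurd (by simpa using hf) (hy p hp)
            · exact ⟨y, rfl⟩
          rcases hfind with ⟨y, hy⟩
          simp [hlt2, hblt, hne, hy]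
    · have hstep : pvFoldB f (a :: T) (some (c, q)) = pvFoldB f T (some (c, q)) := by
        simp [pvFoldB, h]
      rw [hstep, ih]
      have hmin : min c (f a) = c := by omega
      have hM : pvMin f c (a :: T) = pvMin f c T := by rw [pvMin_cons, hmin]
      rw [hM]
      by_cases hlt2 : pvMin f c T < c
      · have hne : (f a == pvMin f c T) = false := by simp; omega
        simp [hlt2, hne]
      · simp [hlt2]

theorem pvFoldB_cons_none (f : Int × Int → Int) (a : Int × Int) (T : List (Int × Int)) :
    pvFoldB f (a :: T) none = pvFoldB f T (some (f a, a)) := by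
  simp [pvFoldB]

-- find? on a pvLt-pairwise list returns the pvLt-least element satisfying the predicate
theorem pvFind_first {L : List (Int × Int)} (hL : L.Pairwise pvLt) {P : Int × Int → Bool}
    {x : Int × Int} (hx : L.find? P = some x) :
    P x = true ∧ x ∈ L ∧ ∀ y ∈ L, P y = true → ¬ pvLt y x := by
  induction L with
  | nil => simp at hx
  | cons a T ih =>
    rcases List.pairwise_cons.1 hL with ⟨ha, hT⟩
    by_cases hPa : P a
    · rw [List.find?_cons_of_pos hPa] at hx
      injection hx with hx; subst hx
      refine ⟨hPa, List.mem_cons_self, ?_⟩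
      intro y hy _
      rcases List.mem_cons.1 hy with h | h
      · subst h; simp [pvLt]
      · have := ha y h; simp [pvLt] at this ⊢; omega
    · rw [List.find?_cons_of_neg (by simpa using hPa)] at hx
      rcases ih hT hx with ⟨h1, h2, h3⟩
      refine ⟨h1, List.mem_cons_of_mem _ h2, ?_⟩
      intro y hy hPy
      rcases List.mem_cons.1 hy with h | h
      · subst h; exact absurd hPy (by simpa using hPa)
      · exact h3 y h hPy

-- pairwise pvLt for a flatMap of rows with constant first component
theorem pvPairwise_flatMap (L : List Int) (g : Int → List (Int × Int))
    (hL : L.Pairwise (· < ·)) (hrow : ∀ a, (g a).Pairwise pvLt)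
    (hfst : ∀ a p, p ∈ g a → p.1 = a) : (L.flatMap g).Pairwise pvLt := by
  induction L with
  | nil => simp
  | cons a T ih =>
    rcases List.pairwise_cons.1 hL with ⟨ha, hT⟩
    rw [List.flatMap_cons, List.pairwise_append]
    refine ⟨hrow a, ih hT, ?_⟩
    intro x hx y hy
    rcases List.mem_flatMap.1 hy with ⟨b, hb, hyb⟩
    have h1 : x.1 = a := hfst a x hx
    have h2 : y.1 = b := hfst b y hyb
    have : a < b := ha b hb
    left; omega

theorem pvAll_pairwise (n : Int) : (pvAll n).Pairwise pvLt := by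
  apply pvPairwise_flatMap
  · exact PySem.List.pairwise_lt_pyRange_one 0 n
  · intro a
    apply List.pairwise_map.2
    exact ((PySem.List.pairwise_lt_pyRange_one 0 n).filter _).imp (fun h => Or.inr ⟨rfl, h⟩)
  · intro a p hp
    rcases List.mem_map.1 hp with ⟨j, _, hj⟩
    rw [← hj]

theorem pvUp_pairwise (n : Int) : (pvUp n).Pairwise pvLt := by
  apply pvPairwise_flatMap
  · exact PySem.List.pairwise_lt_pyRange_one 0 n
  · intro a
    apply List.pairwise_map.2
    exact (PySem.List.pairwise_lt_pyRange_one (a+1) n).imp (fun h => Or.inr ⟨rfl, h⟩)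
  · intro a p hp
    rcases List.mem_map.1 hp with ⟨j, _, hj⟩
    rw [← hj]

theorem pvMem_all (n : Int) (p : Int × Int) :
    p ∈ pvAll n ↔ 0 ≤ p.1 ∧ p.1 < n ∧ 0 ≤ p.2 ∧ p.2 < n ∧ p.2 ≠ p.1 := by
  simp [pvAll, List.mem_flatMap, List.mem_filter, PySem.List.mem_pyRange_one, List.mem_map]
  constructor
  · rintro ⟨i, ⟨hi0, hin⟩, j, ⟨⟨hj0, hjn⟩, hne⟩, hp⟩
    rw [← hp]; exact ⟨hi0, hin, hj0, hjn, hne⟩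
  · rintro ⟨h1, h2, h3, h4, h5⟩
    exact ⟨p.1, ⟨h1, h2⟩, p.2, ⟨⟨h3, h4⟩, h5⟩, rfl⟩

theorem pvMem_up (n : Int) (p : Int × Int) :
    p ∈ pvUp n ↔ 0 ≤ p.1 ∧ p.1 < p.2 ∧ p.2 < n := by
  simp [pvUp, List.mem_flatMap, PySem.List.mem_pyRange_one, List.mem_map]
  constructor
  · rintro ⟨i, ⟨hi0, hin⟩, j, ⟨hj1, hjn⟩, hp⟩
    refine ⟨?_, ?_, ?_⟩ <;> rw [← hp] <;> omega
  · rintro ⟨h1, h2, h3⟩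
    exact ⟨p.1, ⟨h1, by omega⟩, p.2, ⟨by omega, h3⟩, rfl⟩

-- f is symmetric
theorem pvF_swap (A : List Int) (k : Int) (p : Int × Int) :
    pvF A k (p.2, p.1) = pvF A k p := by
  simp [pvF, Int.mul_comm]

-- bound: |k| ≤ 2^31 and k ≠ 0 make every f value smaller than A's sentinel
theorem pvF_lt_sentinel (A : List Int) (k : Int) (hk : k ≠ 0) (hkb : k ≤ 2147483648)
    (p : Int × Int) : pvF A k p < 9999999999999999999 := by
  rcases lt_trichotomy k 0 with h | h | h
  · have := PySem.Int.mod_neg_bounds (a := PySem.List.pyGetD A p.1 0 * PySem.List.pyGetD A p.2 0) h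
    unfold pvF; omega
  · exact absurd h hk
  · have := PySem.Int.mod_lt (a := PySem.List.pyGetD A p.1 0 * PySem.List.pyGetD A p.2 0) h
    unfold pvF; omega

-- A's result list is the all-pairs list rendered as two-element lists
theorem pvResultA (n : Int) :
    ([PySem.List.pyRange 0 n 1, PySem.List.pyRange 0 n 1].foldl
      (fun result pool =>
        result.flatMap (fun x => (pool.filter (fun y => !(decide (y ∈ x)))).map (fun y => x ++ [y])))
      [[]]) = (pvAll n).map (fun p => [p.1, p.2]) := by
  simp [List.foldl, pvAll, List.map_flatMap, List.flatMap_map, List.map_map]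
  rfl

-- A's scan over rendered pairs equals pvFold
theorem pvScanA (A : List Int) (k : Int) (L : List (Int × Int)) :
    ∀ (c : Int) (r : Option (Int × Int)),
      (L.map (fun p => [p.1, p.2])).foldl (pvStepA A k) (c, r.map (fun p => [p.1, p.2])) =
        ((pvFold (pvF A k) L (c, r)).1, (pvFold (pvF A k) L (c, r)).2.map (fun p => [p.1, p.2])) := by
  induction L with
  | nil => intro c r; simp [pvFold]
  | cons a T ih =>
    intro c r
    by_cases h : pvF A k a < c
    · have hmod : PySem.Int.mod (PySem.List.pyGetD A a.1 0 * PySem.List.pyGetD A a.2 0) k < c := by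
        simpa [pvF] using h
      have h' : pvStepA A k (c, r.map (fun p => [p.1, p.2])) [a.1, a.2] =
          (pvF A k a, some [a.1, a.2]) := by
        simp [pvStepA, pvF, hmod]
      have hfold : pvFold (pvF A k) (a :: T) (c, r) = pvFold (pvF A k) T (pvF A k a, some a) := by
        simp [pvFold, h]
      rw [hfold, List.map_cons, List.foldl_cons, h']
      have := ih (pvF A k a) (some a)
      simpa using this
    · have hmod : ¬ PySem.Int.mod (PySem.List.pyGetD A a.1 0 * PySem.List.pyGetD A a.2 0) k < c := by
        simpa [pvF] using h
      have h' : pvStepA A k (c, r.map (fun p => [p.1, p.2])) [a.1, a.2] =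
          (c, r.map (fun p => [p.1, p.2])) := by
        simp [pvStepA, hmod]
      have hfold : pvFold (pvF A k) (a :: T) (c, r) = pvFold (pvF A k) T (c, r) := by
        simp [pvFold, h]
      rw [hfold, List.map_cons, List.foldl_cons, h']
      exact ih c r

-- B's nested loops equal pvFoldB over the upper-triangle pair list
theorem pvScanB (A : List Int) (k : Int) (n : Int) :
    ∀ (st : Option (Int × Int × Int)),
      (PySem.List.pyRange 0 n 1).foldl (fun best i =>
        (PySem.List.pyRange (i + 1) n 1).foldl (fun best j => pvStepB A k best i j) best) st =
      pvFoldB (pvF A k) (pvUp n) st := by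
  have hstep : ∀ (st : Option (Int × Int × Int)) (p : Int × Int),
      pvStepB A k st p.1 p.2 =
        (match st with
          | none => some (pvF A k p, p)
          | some (m, q) => if pvF A k p < m then some (pvF A k p, p) else some (m, q)) := by
    rintro (_ | ⟨m, q⟩) ⟨i, j⟩ <;> simp [pvStepB, pvF]
  intro st
  rw [pvUp, pvFoldB, List.foldl_flatMap]
  apply List.foldl_ext
  intro b x _
  rw [List.foldl_map]
  apply List.foldl_ext
  intro b' j _
  exact hstep b' (x, j)

-- pvLt is a strict total order: mutual non-lt means equality
theorem pvLt_antisymm (x y : Int × Int) (h1 : ¬ pvLt x y) (h2 : ¬ pvLt y x) : x = y := by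
  simp [pvLt] at h1 h2
  have : x.1 = y.1 ∧ x.2 = y.2 := by omega
  exact Prod.ext this.1 this.2

-- the first minimizer over all ordered pairs is ordered, and equals the first minimizer over i<j pairs
theorem pvKey (A : List Int) (k : Int) (n : Int) (M : Int) (x y : Int × Int)
    (hx : (pvAll n).find? (fun p => pvF A k p == M) = some x)
    (hy : (pvUp n).find? (fun p => pvF A k p == M) = some y) :
    x.1 < x.2 ∧ x = y := by
  rcases pvFind_first (pvAll_pairwise n) hx with ⟨hPx, hxm, hxmin⟩
  rcases pvFind_first (pvUp_pairwise n) hy with ⟨hPy, hym, hymin⟩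
  have hfx : pvF A k x = M := by simpa using hPx
  have hfy : pvF A k y = M := by simpa using hPy
  rcases (pvMem_all n x).1 hxm with ⟨hx1, hx2, hx3, hx4, hx5⟩
  have hxo : x.1 < x.2 := by
    by_contra hno
    have hswap : (x.2, x.1) ∈ pvAll n := (pvMem_all n _).2 ⟨hx3, hx4, hx1, hx2, by omega⟩
    have : ¬ pvLt (x.2, x.1) x := hxmin _ hswap (by simp [pvF_swap, hfx])
    simp [pvLt] at this
    omega
  refine ⟨hxo, ?_⟩
  have hxu : x ∈ pvUp n := (pvMem_up n x).2 ⟨hx1, hxo, hx4⟩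
  have h1 : ¬ pvLt x y := hymin x hxu (by simp [hfx])
  have hyu := (pvMem_up n y).1 hym
  have hya : y ∈ pvAll n := (pvMem_all n y).2 ⟨hyu.1, by omega, by omega, hyu.2.2, by omega⟩
  have h2 : ¬ pvLt y x := hxmin y hya (by simp [hfy])
  exact pvLt_antisymm x y h1 h2

-- ===== VERDICT (by name: the statement is the Claim_ definition above) =====
theorem min_mod_tuple_spec : Claim_equal_min_mod_tuple := by
  intro A k hdom hpre
  rcases hpre with ⟨hlen, hk⟩
  unfold Spec_min_mod_tuple
  simp only [Dom_min_mod_tuple, pvDomInt, Bool.and_eq_true, List.all_eq_true, decide_eq_true_eq] at hdom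
  have hkb : k ≤ 2147483648 := hdom.2.2
  set n : Int := (A.length : Int) with hn
  have hn2 : 2 ≤ n := by omega
  set f : Int × Int → Int := pvF A k with hf
  set C : Int := 9999999999999999999 with hC
  have hbound : ∀ p : Int × Int, f p < C := fun p => pvF_lt_sentinel A k hk hkb p
  -- (0,1) belongs to both pair lists
  have h01a : ((0 : Int), (1 : Int)) ∈ pvAll n := (pvMem_all n _).2 (by refine ⟨?_, ?_, ?_, ?_, ?_⟩ <;> simp <;> omega)
  have h01u : ((0 : Int), (1 : Int)) ∈ pvUp n := (pvMem_up n _).2 (by refine ⟨?_, ?_, ?_⟩ <;> simp <;> omega)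
  set MA : Int := pvMin f C (pvAll n) with hMA
  set MU : Int := pvMin f C (pvUp n) with hMU
  have hMAlt : MA < C := lt_of_le_of_lt (pvMin_le_mem f (pvAll n) C _ h01a) (hbound _)
  have hMUlt : MU < C := lt_of_le_of_lt (pvMin_le_mem f (pvUp n) C _ h01u) (hbound _)
  -- the two minima agree
  have hup_sub : ∀ p ∈ pvUp n, p ∈ pvAll n := by
    intro p hp
    rcases (pvMem_up n p).1 hp with ⟨h1, h2, h3⟩
    exact (pvMem_all n p).2 ⟨h1, by omega, by omega, h3, by omega⟩
  have hMAle : MA ≤ MU := by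
    rcases pvMin_attained f (pvUp n) C with h | ⟨p, hp, hfp⟩
    · omega
    · have := pvMin_le_mem f (pvAll n) C p (hup_sub p hp); omega
  have hMUle : MU ≤ MA := by
    rcases pvMin_attained f (pvAll n) C with h | ⟨p, hp, hfp⟩
    · omega
    · rcases (pvMem_all n p).1 hp with ⟨h1, h2, h3, h4, h5⟩
      by_cases ho : p.1 < p.2
      · have hpu : p ∈ pvUp n := (pvMem_up n p).2 ⟨h1, ho, h4⟩
        have := pvMin_le_mem f (pvUp n) C p hpu; omega
      · have hpu : (p.2, p.1) ∈ pvUp n := (pvMem_up n _).2 ⟨h3, by omega, by omega⟩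
        have h6 := pvMin_le_mem f (pvUp n) C _ hpu
        have h7 : f (p.2, p.1) = f p := by rw [hf]; exact pvF_swap A k p
        rw [← hMU] at h6
        omega
  have hM : MA = MU := le_antisymm hMAle hMUle
  -- the two first minimizers exist and agree
  have hxe : ∃ x, (pvAll n).find? (fun p => f p == MA) = some x := by
    rcases pvMin_attained f (pvAll n) C with h | ⟨p, hp, hfp⟩
    · omega
    · rcases hfind : (pvAll n).find? (fun p => f p == MA) with _ | x
      · rw [List.find?_eq_none] at hfind
        exact absurd (by simpa using hfp) (hfind p hp)
      · exact ⟨x, rfl⟩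
  have hye : ∃ y, (pvUp n).find? (fun p => f p == MU) = some y := by
    rcases pvMin_attained f (pvUp n) C with h | ⟨p, hp, hfp⟩
    · omega
    · rcases hfind : (pvUp n).find? (fun p => f p == MU) with _ | y
      · rw [List.find?_eq_none] at hfind
        exact absurd (by simpa using hfp) (hfind p hp)
      · exact ⟨y, rfl⟩
  rcases hxe with ⟨x, hx⟩
  rcases hye with ⟨y, hy⟩
  have hkey := pvKey A k n MA x y (by rw [← hf]; exact hx) (by rw [← hf, hM]; exact hy)
  rcases hkey with ⟨hxo, hxy⟩
  -- A's value
  have hA : min_mod_tuple A k = (x.1, x.2) := by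
    unfold min_mod_tuple
    simp only [PySem.List.len_eq, ← hn]
    rw [pvResultA n]
    have hscan := pvScanA A k (pvAll n) C none
    simp only [Option.map_none] at hscan
    rw [hscan, ← hf]
    rw [pvFold_char f (pvAll n) C none]
    simp only [← hMA, if_pos hMAlt, hx]
    have hsorted : PySem.List.sorted [x.1, x.2] (fun v => v) false = [x.1, x.2] :=
      PySem.List.sorted_eq_self_of_pairwise _ _ (by simp [List.pairwise_cons]; omega)
    simp [hsorted]
  -- B's value
  have hB : min_mod_tuple_alt A k = (y.1, y.2) := by
    unfold min_mod_tuple_alt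
    simp only [PySem.List.len_eq, ← hn]
    rw [pvScanB A k n none]
    rcases hcons : pvUp n with _ | ⟨a, T⟩
    · rw [hcons] at h01u; simp at h01u
    · have hfa : min C (f a) = f a := by have := hbound a; omega
      have hMUT : MU = pvMin f (f a) T := by
        rw [hMU, hcons, pvMin_cons, hfa]
      rw [pvFoldB_cons_none, pvFoldB_some, ← hf, ← hMUT]
      rw [hcons, List.find?_cons] at hy
      by_cases hfaM : f a = MU
      · have hbeq : (f a == MU) = true := by simpa using hfaM
        simp only [hbeq] at hy
        injection hy with hy
        subst hy
        have : ¬ MU < f a := by omega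
        simp [this]
      · have hbeq : (f a == MU) = false := by simpa using hfaM
        simp only [hbeq] at hy
        have hlt : MU < f a := by
          have h6 : MU ≤ f a := by
            rw [hMUT]; exact pvMin_le_c f T (f a)
          omega
        simp [hlt, hy]
  rw [hA, hB, hxy]
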